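-- pv_equiv track=rewrite | github.com/nagula-ritvika/Algorithms-Practice | Strings/palindromic_substrings.py | manachers
-- ===== SOURCE A (Python) =====
-- def manachers(s):
--     a = '@#' + '#'.join(s) + '#$'
--     z = [0] * len(a)
--     center = right = 0
--
--     for i in range(1, len(a) - 1):
--         if i < right:
--             z[i] = min(right - i, z[2 * center - i])
--
--         while a[i + z[i] + 1] == a[i - z[i] - 1]:
--             z[i] += 1
--         if i + z[i] > right:
--             center, right = i, i + z[i]
--
--     return z
-- ===== SOURCE B (Python) =====
-- def manachers(s):
--     a = '@#' + '#'.join(s) + '#$'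
--
--     def cpl(u, v):
--         n = 0
--         for x, y in zip(u, v):
--             if x != y:
--                 return n
--             n += 1
--         return n
--
--     return [cpl(a[i + 1:], a[:i][::-1]) if 0 < i < len(a) - 1 else 0
--             for i in range(len(a))]
-- ===== Notes on version B (the rewrite author's own statement) =====
-- stated objective: simpler
-- what changed: Replaces Manacher's stateful center/right fold with indexed while-expansion by a per-center longest-common-prefix of the right slice and the reversed left slice of the same sentinel-transformed string, computed by zipping the two slices.
-- outside the precondition, e.g. on manachers('$ab'): A returns [0, 0, 1, 0, 1, 0, 1, 0, 0], B returns [0, 0, 1, 0, 1, 0, 1, 0, 0]; on manachers('$'): A raises IndexError, B returns [0, 0, 1, 1, 0]; on manachers('a$a'): A raises IndexError, B returns [0, 0, 1, 0, 3, 0, 2, 0, 0]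
import Mathlib
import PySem

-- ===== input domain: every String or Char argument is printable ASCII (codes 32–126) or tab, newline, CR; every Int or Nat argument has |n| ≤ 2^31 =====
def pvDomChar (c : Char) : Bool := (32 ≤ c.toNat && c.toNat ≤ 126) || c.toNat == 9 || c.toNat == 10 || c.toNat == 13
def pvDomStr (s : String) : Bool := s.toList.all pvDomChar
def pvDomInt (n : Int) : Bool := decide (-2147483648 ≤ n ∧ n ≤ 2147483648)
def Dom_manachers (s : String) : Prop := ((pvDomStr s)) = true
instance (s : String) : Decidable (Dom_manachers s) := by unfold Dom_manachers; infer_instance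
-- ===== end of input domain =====

-- B replaces Manacher's center/right mirror reuse with a per-center common-prefix
-- of the right slice and the reversed left slice (objective: simpler; not faster).


-- ===== PORT A =====
-- the char list of a = '@#' + '#'.join(s) + '#$' (both Pythons build this same string)
def pvTrans (s : String) : List Char :=
  '@' :: '#' :: s.toList.intersperse '#' ++ ['#', '$']

-- the test 'a[i+z+1] == a[i-z-1]'; pyGet? is Python indexing (negative wrap, none = IndexError);
-- inside Pre_ every evaluated index is in range, so the 'none ⇒ false' arm never fires there
def pvCond (t : List Char) (i z : Int) : Bool :=
  match PySem.List.pyGet? t (i + z + 1), PySem.List.pyGet? t (i - z - 1) with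
  | some x, some y => x == y
  | _, _ => false

-- the loop 'while a[i+z+1] == a[i-z-1]: z += 1' (fuel t.length always suffices inside Pre_)
def pvExpand (t : List Char) (i : Int) : Int → Nat → Int
  | z, 0 => z
  | z, f + 1 => if pvCond t i z then pvExpand t i (z + 1) f else z

-- one iteration of A's for-loop, state (z, center, right); i ≥ 1, so .toNat is exact for z[i]=…
def manachersStep (t : List Char) : (List Int × Int × Int) → Int → (List Int × Int × Int) :=
  fun st i =>
    let z := st.1
    let center := st.2.1
    let right := st.2.2
    let z1 := if i < right then
        z.set i.toNat (min (right - i) ((PySem.List.pyGet? z (2 * center - i)).getD 0))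
      else z
    let v := pvExpand t i ((PySem.List.pyGet? z1 i).getD 0) t.length
    let z2 := z1.set i.toNat v
    if i + v > right then (z2, i, i + v) else (z2, center, right)

def manachers (s : String) : List Int :=
  let t := pvTrans s
  let z := List.replicate t.length (0 : Int)
  ((PySem.List.pyRange 1 ((t.length : Int) - 1) 1).foldl (manachersStep t) (z, 0, 0)).1

-- ===== PORT B =====
-- cpl(u, v): the zip loop counting the common prefix, as the obvious structural recursion
def pvCpl : List Char → List Char → Int
  | x :: u, y :: v => if x ≠ y then 0 else pvCpl u v + 1
  | _, _ => 0

-- [cpl(a[i+1:], a[:i][::-1]) if 0 < i < len(a)-1 else 0 for i in range(len(a))];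
-- a[:i][::-1] is the reverse of the slice (PySem.List.slice?_none_none_neg_one)
def manachers_alt (s : String) : List Int :=
  let t := pvTrans s
  (PySem.List.pyRange 0 (t.length : Int) 1).map (fun i =>
    if 0 < i ∧ i < (t.length : Int) - 1 then
      pvCpl (PySem.List.slice t (some (i + 1)) none)
            (PySem.List.slice t none (some i)).reverse
    else 0)

-- ===== PRECONDITION & SPEC =====
-- Pre_ excludes strings containing the sentinel character '$': on some of those A raises
-- IndexError, and where A does return the value rests on index wraparound past the broken
-- right sentinel.
def Pre_manachers (s : String) : Prop := '$' ∉ s.toList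
instance (s : String) : Decidable (Pre_manachers s) := by unfold Pre_manachers; infer_instance

def pvWitness_manachers : String := "abacaba"

def Spec_manachers (s : String) (out : List Int) : Prop := out = manachers_alt s
instance (s : String) (out : List Int) : Decidable (Spec_manachers s out) := by unfold Spec_manachers; infer_instance

-- ===== CLAIM (what is proved, stated in full; the proofs are below) =====
def Claim_equal_manachers : Prop := ∀ (s : String), Dom_manachers s → Pre_manachers s → Spec_manachers s (manachers s)

-- ===== LEMMAS AND PROOFS =====

-- total character access used by the proofs
def tAt (t : List Char) (i : Int) : Char := t.getD i.toNat '?'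

-- the structural facts about the transformed string that the equivalence uses
def GoodT (t : List Char) : Prop :=
  4 ≤ t.length ∧ tAt t 0 = '@' ∧ tAt t ((t.length : Int) - 1) = '$' ∧
    t.getLast? = some '$' ∧
    (∀ i : Int, 1 ≤ i → i ≤ (t.length : Int) - 2 → tAt t i ≠ '$') ∧
    (∀ i : Int, 1 ≤ i → i ≤ (t.length : Int) - 2 → i % 2 = 1 → tAt t i = '#') ∧
    (t.length % 2 = 1 ∨ t = ['@', '#', '#', '$'])

-- the true radius: expansion from 0
def pvR (t : List Char) (i : Int) : Int := pvExpand t i 0 t.length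

theorem inter_mem (l : List Char) : ∀ x ∈ List.intersperse '#' l, x ∈ l ∨ x = '#' := by
  induction l with
  | nil => simp [List.intersperse]
  | cons a t ih =>
    cases t with
    | nil => simp [List.intersperse]
    | cons b t' =>
      intro x hx
      rw [show List.intersperse '#' (a :: b :: t') = a :: '#' :: List.intersperse '#' (b :: t')
        from by simp [List.intersperse]] at hx
      rcases List.mem_cons.mp hx with rfl | hx
      · exact Or.inl List.mem_cons_self
      rcases List.mem_cons.mp hx with rfl | hx
      · exact Or.inr rfl
      rcases ih x hx with h | h
      · exact Or.inl (List.mem_cons_of_mem _ h)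
      · exact Or.inr h

theorem inter_odd (l : List Char) : ∀ k : Nat, k % 2 = 1 → k < (List.intersperse '#' l).length →
    (List.intersperse '#' l)[k]? = some '#' := by
  induction l with
  | nil => intro k hk1 hk2; simp [List.intersperse] at hk2
  | cons a t ih =>
    cases t with
    | nil => intro k hk1 hk2; simp [List.intersperse] at hk2; omega
    | cons b t' =>
      intro k hk1 hk2
      have he : List.intersperse '#' (a :: b :: t') = a :: '#' :: List.intersperse '#' (b :: t') := by
        simp [List.intersperse]
      rw [he] at hk2 ⊢
      simp only [List.length_cons] at hk2
      rcases Nat.lt_or_ge k 2 with hk | hk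
      · have : k = 1 := by omega
        subst this
        rfl
      · obtain ⟨m, rfl⟩ : ∃ m, k = m + 2 := ⟨k - 2, by omega⟩
        show (List.intersperse '#' (b :: t'))[m]? = some '#'
        exact ih m (by omega) (by omega)

theorem getD_mem_of_lt {α : Type} (l : List α) (n : Nat) (d : α) (h : n < l.length) :
    l.getD n d ∈ l := by
  rw [List.getD_eq_getElem l d h]
  exact List.getElem_mem h

theorem goodT_of_pre (s : String) (h2 : '$' ∉ s.toList) :
    GoodT (pvTrans s) := by
  have hlen : (pvTrans s).length = (s.toList.intersperse '#').length + 4 := by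
    simp [pvTrans]
  have hshape : pvTrans s = '@' :: (('#' :: s.toList.intersperse '#' ++ ['#']) ++ ['$']) := by
    simp [pvTrans]
  have hmidlen : ('#' :: s.toList.intersperse '#' ++ ['#']).length
      = (s.toList.intersperse '#').length + 2 := by simp
  have hmidGet : ∀ i : Int, 1 ≤ i → i ≤ ((pvTrans s).length : Int) - 2 →
      tAt (pvTrans s) i = ('#' :: s.toList.intersperse '#' ++ ['#']).getD (i.toNat - 1) '?' := by
    intro i hi1 hi2
    obtain ⟨m, hm⟩ : ∃ m, i.toNat = m + 1 := ⟨i.toNat - 1, by omega⟩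
    show (pvTrans s).getD i.toNat '?' = _
    rw [hshape, hm, List.getD_cons_succ, List.getD_append _ _ _ _ (by rw [hmidlen]; omega)]
    norm_num
  have hmidMem : ∀ x ∈ '#' :: s.toList.intersperse '#' ++ ['#'], x ∈ s.toList ∨ x = '#' := by
    intro x hx
    rcases List.mem_cons.mp hx with rfl | hx
    · exact Or.inr rfl
    rcases List.mem_append.mp hx with hx | hx
    · exact inter_mem s.toList x hx
    · simp only [List.mem_singleton] at hx; exact Or.inr hx
  refine ⟨by omega, by simp [tAt, pvTrans], ?_, ?_, ?_, ?_, ?_⟩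
  · -- tAt (n-1) = '$'
    have hidx : ((pvTrans s).length : Int) - 1
        = (((s.toList.intersperse '#').length + 3 : Nat) : Int) := by
      rw [hlen]; push_cast; ring
    rw [hidx]
    simp only [tAt, Int.toNat_natCast]
    rw [hshape]
    show ('@' :: (('#' :: s.toList.intersperse '#' ++ ['#']) ++ ['$'])).getD _ '?' = '$'
    obtain ⟨q, hq⟩ : ∃ q, (s.toList.intersperse '#').length + 3 = q + 1 :=
      ⟨(s.toList.intersperse '#').length + 2, by omega⟩
    rw [hq, List.getD_cons_succ, List.getD_eq_getElem?_getD,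
      List.getElem?_append_right (by rw [hmidlen]; omega)]
    rw [show q - ('#' :: s.toList.intersperse '#' ++ ['#']).length = 0 by rw [hmidlen]; omega]
    rfl
  · rw [hshape, ← List.cons_append]
    exact List.getLast?_concat
  · -- middles are not '$'
    intro i hi1 hi2
    rw [hmidGet i hi1 hi2]
    have hmem := getD_mem_of_lt ('#' :: s.toList.intersperse '#' ++ ['#']) (i.toNat - 1) '?'
      (by rw [hmidlen]; omega)
    rcases hmidMem _ hmem with hs | hh
    · intro hx; rw [hx] at hs; exact h2 hs
    · rw [hh]; decide
  · -- odd middles are '#'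
    intro i hi1 hi2 hodd
    rw [hmidGet i hi1 hi2]
    have hq2 : (i.toNat - 1) % 2 = 0 := by omega
    rcases Nat.eq_zero_or_pos (i.toNat - 1) with hz | hpos
    · rw [hz]; rfl
    · obtain ⟨q, hq⟩ : ∃ q, i.toNat - 1 = q + 1 := ⟨i.toNat - 2, by omega⟩
      rw [hq]
      show (s.toList.intersperse '#' ++ ['#']).getD q '?' = '#'
      rw [List.getD_eq_getElem?_getD]
      have hqlen : q ≤ (s.toList.intersperse '#').length := by omega
      rcases Nat.lt_or_ge q (s.toList.intersperse '#').length with hql | hql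
      · rw [List.getElem?_append_left hql, inter_odd s.toList q (by omega) hql]
        rfl
      · have hqe : q = (s.toList.intersperse '#').length := by omega
        rw [hqe, List.getElem?_append_right (le_refl _)]
        simp
  · -- parity
    by_cases hs : s.toList = []
    · right
      rw [pvTrans, hs]
      rfl
    · left
      have h1 : 1 ≤ s.toList.length := by
        cases hl : s.toList with
        | nil => exact absurd hl hs
        | cons a t => simp [hl]
      have h2' : (s.toList.intersperse '#').length = 2 * s.toList.length - 1 :=
        List.length_intersperse
      omega

theorem expand_le (t : List Char) (i : Int) :
    ∀ (f : Nat) (z : Int), z ≤ pvExpand t i z f := by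
  intro f
  induction f with
  | zero => intro z; simp [pvExpand]
  | succ f ih =>
    intro z
    simp only [pvExpand]
    split
    · exact le_trans (by omega) (ih (z + 1))
    · exact le_rfl

theorem cond_true_lt (t : List Char) (i z : Int) (h : pvCond t i z = true)
    (hi : 0 ≤ i) (hz : 0 ≤ z) : i + z + 1 < (t.length : Int) := by
  unfold pvCond at h
  rcases hg : PySem.List.pyGet? t (i + z + 1) with _ | x
  · rw [hg] at h; simp at h
  · have : PySem.Raise.InRange t.length (i + z + 1) := by
      by_contra hn
      rw [(PySem.List.pyGet?_eq_none_iff t (i + z + 1)).mpr hn] at hg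
      simp at hg
    rcases this with ⟨_, hlt⟩
    exact hlt

theorem expand_path (t : List Char) (i : Int) :
    ∀ (f : Nat) (z d : Int), z ≤ d → d < pvExpand t i z f → pvCond t i d = true := by
  intro f
  induction f with
  | zero => intro z d h1 h2; simp [pvExpand] at h2; omega
  | succ f ih =>
    intro z d h1 h2
    simp only [pvExpand] at h2
    by_cases hc : pvCond t i z = true
    · rw [if_pos hc] at h2
      rcases eq_or_lt_of_le h1 with rfl | hlt
      · exact hc
      · exact ih (z + 1) d (by omega) h2
    · rw [if_neg hc] at h2; omega

theorem expand_stop (t : List Char) (i : Int) (hi : 0 ≤ i) :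
    ∀ (f : Nat) (z : Int), 0 ≤ z → (t.length : Int) - i - 1 - z < (f : Int) →
      pvCond t i (pvExpand t i z f) = false := by
  intro f
  induction f with
  | zero =>
    intro z hz hf
    simp only [pvExpand]
    by_contra hc
    have := cond_true_lt t i z (by simpa using hc) hi hz
    simp at hf
    omega
  | succ f ih =>
    intro z hz hf
    simp only [pvExpand]
    by_cases hc : pvCond t i z = true
    · rw [if_pos hc]
      have hlt := cond_true_lt t i z hc hi hz
      exact ih (z + 1) (by omega) (by push_cast at hf ⊢; omega)
    · rw [if_neg hc]
      simpa using hc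

theorem expand_ub (t : List Char) (i : Int) (hi : 0 ≤ i) :
    ∀ (f : Nat) (z : Int), 0 ≤ z → z ≤ (t.length : Int) - i - 1 →
      pvExpand t i z f ≤ (t.length : Int) - i - 1 := by
  intro f
  induction f with
  | zero => intro z hz hub; simpa [pvExpand] using hub
  | succ f ih =>
    intro z hz hub
    simp only [pvExpand]
    by_cases hc : pvCond t i z = true
    · rw [if_pos hc]
      have hlt := cond_true_lt t i z hc hi hz
      exact ih (z + 1) (by omega) (by omega)
    · rw [if_neg hc]; exact hub

theorem expand_reach (t : List Char) (i v : Int)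
    (hA : pvCond t i v = false) (hB : ∀ d : Int, 0 ≤ d → d < v → pvCond t i d = true) :
    ∀ (f : Nat) (z : Int), 0 ≤ z → z ≤ v → v - z < (f : Int) → pvExpand t i z f = v := by
  intro f
  induction f with
  | zero => intro z h1 h2 h3; simp at h3; omega
  | succ f ih =>
    intro z h1 h2 h3
    simp only [pvExpand]
    rcases eq_or_lt_of_le h2 with rfl | hlt
    · rw [if_neg (by simp [hA])]
    · rw [if_pos (hB z h1 hlt)]
      exact ih (z + 1) (by omega) (by omega) (by push_cast at h3 ⊢; omega)

theorem pvR_nonneg (t : List Char) (i : Int) : 0 ≤ pvR t i := expand_le t i t.length 0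

theorem pvR_ub (t : List Char) (i : Int) (h1 : 1 ≤ i) (h2 : i ≤ (t.length : Int) - 2) :
    pvR t i ≤ (t.length : Int) - i - 1 :=
  expand_ub t i (by omega) t.length 0 le_rfl (by omega)

theorem pvR_stop (t : List Char) (i : Int) (h1 : 0 ≤ i) :
    pvCond t i (pvR t i) = false :=
  expand_stop t i h1 t.length 0 le_rfl (by omega)

theorem pvR_path (t : List Char) (i : Int) :
    ∀ d : Int, 0 ≤ d → d < pvR t i → pvCond t i d = true :=
  fun d h1 h2 => expand_path t i t.length 0 d h1 h2

theorem pvR_reach (t : List Char) (i v0 : Int) (h1 : 1 ≤ i) (h2 : i ≤ (t.length : Int) - 2)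
    (h3 : 0 ≤ v0) (h4 : v0 ≤ pvR t i) : pvExpand t i v0 t.length = pvR t i :=
  expand_reach t i (pvR t i) (pvR_stop t i (by omega)) (pvR_path t i) t.length v0 h3 h4
    (by have := pvR_ub t i h1 h2; omega)

theorem pyGet?_tAt (t : List Char) (i : Int) (h1 : 0 ≤ i) (h2 : i < (t.length : Int)) :
    PySem.List.pyGet? t i = some (tAt t i) := by
  rw [PySem.List.pyGet?_eq_some_getElem t h1 h2]
  congr 1
  rw [tAt, List.getD_eq_getElem t '?' (by omega)]

theorem cond_iff (t : List Char) (i z : Int)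
    (h1 : 0 ≤ i + z + 1) (h2 : i + z + 1 < (t.length : Int))
    (h3 : 0 ≤ i - z - 1) (h4 : i - z - 1 < (t.length : Int)) :
    (pvCond t i z = true ↔ tAt t (i + z + 1) = tAt t (i - z - 1)) := by
  unfold pvCond
  rw [pyGet?_tAt t _ h1 h2, pyGet?_tAt t _ h3 h4]
  simp

theorem rad_lb (t : List Char) (hg : GoodT t) (i : Int)
    (h1 : 1 ≤ i) (h2 : i ≤ (t.length : Int) - 2) :
    pvR t i ≤ i := by
  obtain ⟨hn4, h0, hlast, hlastq, hmidS, hmidOdd, hpar⟩ := hg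
  by_contra hc
  push Not at hc
  have hd : pvCond t i i = true := pvR_path t i i (by omega) hc
  have hlt : i + i + 1 < (t.length : Int) := cond_true_lt t i i hd (by omega) (by omega)
  unfold pvCond at hd
  rw [pyGet?_tAt t (i + i + 1) (by omega) hlt] at hd
  rw [show i - i - 1 = -1 by ring, PySem.List.pyGet?_neg_one, hlastq] at hd
  simp only [beq_iff_eq] at hd
  rcases hpar with hodd | hlit
  · have hoZ : ((t.length : Int)) % 2 = 1 := by omega
    exact hmidS (i + i + 1) (by omega) (by omega) hd
  · subst hlit
    simp only [List.length_cons, List.length_nil] at h2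
    have : i = 1 ∨ i = 2 := by omega
    rcases this with rfl | rfl
    · exact absurd hc (by decide)
    · exact absurd hc (by decide)

theorem rad_rb (t : List Char) (hg : GoodT t) (i : Int)
    (h1 : 1 ≤ i) (h2 : i ≤ (t.length : Int) - 2) :
    pvR t i ≤ (t.length : Int) - 2 - i := by
  have hlb := rad_lb t hg i h1 h2
  obtain ⟨hn4, h0, hlast, hlastq, hmidS, hmidOdd, hpar⟩ := hg
  by_contra hc
  push Not at hc
  have hd : pvCond t i ((t.length : Int) - 2 - i) = true :=
    pvR_path t i ((t.length : Int) - 2 - i) (by omega) (by omega)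
  have heq := (cond_iff t i ((t.length : Int) - 2 - i) (by omega) (by omega) (by omega)
    (by omega)).mp hd
  have e1 : i + ((t.length : Int) - 2 - i) + 1 = (t.length : Int) - 1 := by ring
  rw [e1, hlast] at heq
  rcases eq_or_lt_of_le (show (0:Int) ≤ i - ((t.length : Int) - 2 - i) - 1 by omega) with he0 | hge
  · rw [← he0, h0] at heq
    exact absurd heq (by decide)
  · exact hmidS (i - ((t.length : Int) - 2 - i) - 1) (by omega) (by omega) heq.symm

-- characterization of the common-prefix count
theorem cpl_eq (u : List Char) : ∀ (v : List Char) (r : Nat),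
    r ≤ u.length → r ≤ v.length →
    (∀ d : Nat, d < r → u.getD d '?' = v.getD d '?') →
    (r = u.length ∨ r = v.length ∨ u.getD r '?' ≠ v.getD r '?') →
    pvCpl u v = (r : Int) := by
  induction u with
  | nil =>
    intro v r h1 _ _ _
    have : r = 0 := by simpa using h1
    subst this
    cases v <;> rfl
  | cons x u ih =>
    intro v r h1 h2 heq hstop
    cases v with
    | nil =>
      have : r = 0 := by simpa using h2
      subst this
      rfl
    | cons y v =>
      cases r with
      | zero =>
        rcases hstop with h | h | h
        · simp at h
        · simp at h
        · have hxy : x ≠ y := by simpa using h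
          simp [pvCpl, hxy]
      | succ r =>
        have hxy : x = y := by simpa using heq 0 (Nat.succ_pos r)
        have hrec : pvCpl u v = (r : Int) := by
          apply ih v r (by simpa using h1) (by simpa using h2)
          · intro d hd
            simpa using heq (d + 1) (by omega)
          · rcases hstop with h | h | h
            · exact Or.inl (by simpa using h)
            · exact Or.inr (Or.inl (by simpa using h))
            · exact Or.inr (Or.inr (by simpa using h))
        have hne : ¬ x ≠ y := by simp [hxy]
        simp only [pvCpl, hrec]
        rw [if_neg hne]
        push_cast
        ring

theorem dropGetD (t : List Char) (i : Int) (d : Nat) (hi : 0 ≤ i) :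
    (t.drop (i + 1).toNat).getD d '?' = tAt t (i + 1 + (d : Int)) := by
  rw [List.getD_eq_getElem?_getD, List.getElem?_drop, ← List.getD_eq_getElem?_getD, tAt]
  congr 1
  omega

theorem revTakeGetD (t : List Char) (i : Int) (d : Nat)
    (h1 : 1 ≤ i) (hle : i ≤ (t.length : Int)) (hd : (d : Int) < i) :
    ((t.take i.toNat).reverse).getD d '?' = tAt t (i - 1 - (d : Int)) := by
  have hlen : (t.take i.toNat).length = i.toNat := by
    rw [List.length_take]
    omega
  rw [List.getD_eq_getElem?_getD, List.getElem?_reverse (by omega), hlen]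
  have hlt : i.toNat - 1 - d < i.toNat := by omega
  rw [List.getElem?_take_of_lt hlt, ← List.getD_eq_getElem?_getD, tAt]
  congr 1
  omega

-- B's per-center value equals the expansion radius
theorem cpl_rad (t : List Char) (hg : GoodT t) (i : Int)
    (h1 : 1 ≤ i) (h2 : i ≤ (t.length : Int) - 2) :
    pvCpl (t.drop (i + 1).toNat) ((t.take i.toNat).reverse) = pvR t i := by
  have hR0 := pvR_nonneg t i
  have hlb := rad_lb t hg i h1 h2
  have hrb := rad_rb t hg i h1 h2
  have hn4 := hg.1
  have hgoal := cpl_eq (t.drop (i + 1).toNat) ((t.take i.toNat).reverse) (pvR t i).toNat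
    ?_ ?_ ?_ ?_
  · rw [hgoal, Int.toNat_of_nonneg hR0]
  · rw [List.length_drop]
    omega
  · rw [List.length_reverse, List.length_take]
    omega
  · intro d hd
    have hdR : (d : Int) < pvR t i := by omega
    have hcond := pvR_path t i d (by positivity) hdR
    have heq := (cond_iff t i d (by omega) (by omega) (by omega) (by omega)).mp hcond
    rw [dropGetD t i d (by omega), revTakeGetD t i d h1 (by omega) (by omega)]
    have e1 : i + 1 + (d : Int) = i + (d : Int) + 1 := by ring
    have e2 : i - 1 - (d : Int) = i - (d : Int) - 1 := by ring
    rw [e1, e2]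
    exact heq
  · rcases eq_or_lt_of_le hlb with he | hlt
    · refine Or.inr (Or.inl ?_)
      rw [List.length_reverse, List.length_take]
      omega
    · refine Or.inr (Or.inr ?_)
      have hstop := pvR_stop t i (by omega)
      have hne : tAt t (i + pvR t i + 1) ≠ tAt t (i - pvR t i - 1) := by
        intro he
        rw [(cond_iff t i (pvR t i) (by omega) (by omega) (by omega) (by omega)).mpr he] at hstop
        exact Bool.noConfusion hstop
      rw [dropGetD t i (pvR t i).toNat (by omega),
        revTakeGetD t i (pvR t i).toNat h1 (by omega) (by omega)]
      have e1 : i + 1 + ((pvR t i).toNat : Int) = i + pvR t i + 1 := by omega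
      have e2 : i - 1 - ((pvR t i).toNat : Int) = i - pvR t i - 1 := by omega
      rw [e1, e2]
      exact hne

theorem sym (t : List Char) (hg : GoodT t) (c : Int)
    (h1 : 1 ≤ c) (h2 : c ≤ (t.length : Int) - 2) :
    ∀ d : Int, 0 ≤ d → d ≤ pvR t c → tAt t (c + d) = tAt t (c - d) := by
  have hlb := rad_lb t hg c h1 h2
  have hrb := rad_rb t hg c h1 h2
  intro d hd0 hdR
  rcases eq_or_lt_of_le hd0 with rfl | hpos
  · norm_num
  · have hcond : pvCond t c (d - 1) = true := pvR_path t c (d - 1) (by omega) (by omega)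
    have heq := (cond_iff t c (d - 1) (by omega) (by omega) (by omega) (by omega)).mp hcond
    have e1 : c + (d - 1) + 1 = c + d := by ring
    have e2 : c - (d - 1) - 1 = c - d := by ring
    rw [e1, e2] at heq
    exact heq

theorem mirror (t : List Char) (hg : GoodT t) (c i : Int)
    (h1 : 1 ≤ c) (h2 : c < i) (h3 : i ≤ (t.length : Int) - 2) (h4 : i < c + pvR t c) :
    min (c + pvR t c - i) (pvR t (2 * c - i)) ≤ pvR t i := by
  have hRc0 := pvR_nonneg t c
  have hclb := rad_lb t hg c h1 (by omega)
  have hcrb := rad_rb t hg c h1 (by omega)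
  have hj1 : 1 ≤ 2 * c - i := by omega
  have hj2 : 2 * c - i ≤ (t.length : Int) - 2 := by omega
  have hjlb := rad_lb t hg (2 * c - i) hj1 hj2
  have hRj0 := pvR_nonneg t (2 * c - i)
  by_contra hcon
  push Not at hcon
  have hRi0 := pvR_nonneg t i
  have hk1 : min (c + pvR t c - i) (pvR t (2 * c - i)) ≤ c + pvR t c - i := min_le_left _ _
  have hk2 : min (c + pvR t c - i) (pvR t (2 * c - i)) ≤ pvR t (2 * c - i) := min_le_right _ _
  have hs1 : tAt t (i + (pvR t i + 1)) = tAt t (2 * c - i - (pvR t i + 1)) := by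
    have h := sym t hg c h1 (by omega) (i - c + (pvR t i + 1)) (by omega) (by omega)
    have e1 : c + (i - c + (pvR t i + 1)) = i + (pvR t i + 1) := by ring
    have e2 : c - (i - c + (pvR t i + 1)) = 2 * c - i - (pvR t i + 1) := by ring
    rw [e1, e2] at h
    exact h
  have hs2 : tAt t (i - (pvR t i + 1)) = tAt t (2 * c - i + (pvR t i + 1)) := by
    rcases le_or_gt 0 (i - c - (pvR t i + 1)) with hu | hu
    · have h := sym t hg c h1 (by omega) (i - c - (pvR t i + 1)) hu (by omega)
      have e1 : c + (i - c - (pvR t i + 1)) = i - (pvR t i + 1) := by ring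
      have e2 : c - (i - c - (pvR t i + 1)) = 2 * c - i + (pvR t i + 1) := by ring
      rw [e1, e2] at h
      exact h
    · have h := sym t hg c h1 (by omega) (c + (pvR t i + 1) - i) (by omega) (by omega)
      have e1 : c + (c + (pvR t i + 1) - i) = 2 * c - i + (pvR t i + 1) := by ring
      have e2 : c - (c + (pvR t i + 1) - i) = i - (pvR t i + 1) := by ring
      rw [e1, e2] at h
      exact h.symm
  have hs3 : tAt t (2 * c - i + (pvR t i + 1)) = tAt t (2 * c - i - (pvR t i + 1)) :=
    sym t hg (2 * c - i) hj1 hj2 (pvR t i + 1) (by omega) (by omega)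
  have hcond : pvCond t i (pvR t i) = true := by
    rw [cond_iff t i (pvR t i) (by omega) (by omega) (by omega) (by omega)]
    · have e1 : i + pvR t i + 1 = i + (pvR t i + 1) := by ring
      have e2 : i - pvR t i - 1 = i - (pvR t i + 1) := by ring
      rw [e1, e2, hs1, hs2, hs3]
  rw [pvR_stop t i (by omega)] at hcond
  exact Bool.noConfusion hcond

-- the z array after the loop body has run for all indices < i
def zArr (t : List Char) (i : Int) : List Int :=
  (List.range t.length).map (fun (j : Nat) => if 1 ≤ (j : Int) ∧ (j : Int) < i then pvR t (j : Int) else 0)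

-- the center/right invariant
def Pcr (t : List Char) (i c r : Int) : Prop :=
  (c = 0 ∧ r = 0) ∨ (1 ≤ c ∧ c < i ∧ c ≤ (t.length : Int) - 2 ∧ r = c + pvR t c)

theorem zArr_length (t : List Char) (i : Int) : (zArr t i).length = t.length := by
  simp [zArr]

theorem zArr_get (t : List Char) (i m : Int) (h0 : 0 ≤ m) (h1 : m < (t.length : Int)) :
    PySem.List.pyGet? (zArr t i) m = some (if 1 ≤ m ∧ m < i then pvR t m else 0) := by
  rw [PySem.List.pyGet?_of_nonneg _ h0]
  unfold zArr
  rw [List.getElem?_map, List.getElem?_range (by omega)]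
  simp only [Option.map_some]
  congr 1
  have hc : ((m.toNat : Nat) : Int) = m := by omega
  rw [hc]

theorem zArr_set (t : List Char) (i : Int) (h1 : 1 ≤ i) (h2 : i < (t.length : Int)) :
    (zArr t i).set i.toNat (pvR t i) = zArr t (i + 1) := by
  apply List.ext_getElem
  · simp [zArr]
  · intro k hk1 hk2
    have hkn : k < t.length := by simpa [zArr] using hk2
    rw [List.getElem_set]
    unfold zArr
    rw [List.getElem_map, List.getElem_range, List.getElem_map, List.getElem_range]
    by_cases hE : i.toNat = k
    · rw [if_pos hE]
      have : (k : Int) = i := by omega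
      rw [if_pos (by omega), this]
    · rw [if_neg hE]
      have hne : (k : Int) ≠ i := by omega
      by_cases hc : 1 ≤ (k : Int) ∧ (k : Int) < i
      · rw [if_pos hc, if_pos ⟨hc.1, by omega⟩]
      · rw [if_neg hc, if_neg (by omega)]

theorem step_eq (t : List Char) (hg : GoodT t) (i c r : Int)
    (h1 : 1 ≤ i) (h2 : i ≤ (t.length : Int) - 2) (hcr : Pcr t i c r) :
    manachersStep t (zArr t i, c, r) i = (zArr t (i + 1),
      if i + pvR t i > r then (i, i + pvR t i) else (c, r)) ∧
      Pcr t (i + 1) (if i + pvR t i > r then (i, i + pvR t i) else (c, r)).1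
        (if i + pvR t i > r then (i, i + pvR t i) else (c, r)).2 := by
  have hRi0 := pvR_nonneg t i
  have hlen3 := hg.1
  have hitn : (i.toNat : Int) = i := by omega
  have hitlt : i.toNat < (zArr t i).length := by rw [zArr_length]; omega
  constructor
  · unfold manachersStep
    dsimp only
    by_cases hir : i < r
    · rcases hcr with ⟨rfl, rfl⟩ | ⟨hc1, hc2, hc3, hc4⟩
      · omega
      · have hRc0 := pvR_nonneg t c
        have hclb := rad_lb t hg c hc1 hc3
        have hRj0 := pvR_nonneg t (2 * c - i)
        subst hc4
        have hb1 : (0 : Int) ≤ 2 * c - i := by omega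
        have hb2 : 2 * c - i < (t.length : Int) := by omega
        have hb3 : 1 ≤ 2 * c - i ∧ 2 * c - i < i := by omega
        rw [if_pos hir, zArr_get t i (2 * c - i) hb1 hb2, if_pos hb3]
        simp only [Option.getD_some]
        rw [PySem.List.pyGet?_of_nonneg _ (by omega : (0:Int) ≤ i),
          List.getElem?_set_self (by simpa using hitlt)]
        simp only [Option.getD_some]
        have hv0 : pvExpand t i (min (c + pvR t c - i) (pvR t (2 * c - i))) t.length
            = pvR t i := by
          apply pvR_reach t i _ h1 h2 (by omega)
          exact mirror t hg c i hc1 hc2 h2 (by omega)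
        rw [hv0, List.set_set, zArr_set t i h1 (by omega)]
        split_ifs <;> rfl
    · rw [if_neg hir, zArr_get t i i (by omega) (by omega),
        if_neg (show ¬(1 ≤ i ∧ i < i) by omega)]
      simp only [Option.getD_some]
      simp only [show pvExpand t i 0 t.length = pvR t i from rfl]
      rw [zArr_set t i h1 (by omega)]
      split_ifs <;> rfl
  · by_cases hup : i + pvR t i > r
    · rw [if_pos hup]
      exact Or.inr ⟨h1, by omega, h2, rfl⟩
    · rw [if_neg hup]
      rcases hcr with ⟨hc1, hc2⟩ | ⟨hc1, hc2, hc3, hc4⟩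
      · exact Or.inl ⟨hc1, hc2⟩
      · exact Or.inr ⟨hc1, by omega, hc3, hc4⟩

theorem fold_inv (t : List Char) (hg : GoodT t) :
    ∀ (m : Nat) (i c r : Int), i = (t.length : Int) - 1 - (m : Int) → 1 ≤ i → Pcr t i c r →
      ((PySem.List.pyRange i ((t.length : Int) - 1) 1).foldl (manachersStep t)
        (zArr t i, c, r)).1 = zArr t ((t.length : Int) - 1) := by
  intro m
  induction m with
  | zero =>
    intro i c r hi h1 hcr
    rw [PySem.List.pyRange_one_eq_nil (by omega)]
    simp only [List.foldl_nil]
    rw [hi]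
    norm_num
  | succ m ih =>
    intro i c r hi h1 hcr
    have hlt : i < (t.length : Int) - 1 := by push_cast at hi; omega
    rw [PySem.List.pyRange_one_cons hlt]
    simp only [List.foldl_cons]
    obtain ⟨hstep, hpcr⟩ := step_eq t hg i c r h1 (by omega) hcr
    rw [hstep]
    exact ih (i + 1) _ _ (by push_cast at hi ⊢; omega) (by omega) hpcr

theorem zArr_one (t : List Char) : zArr t 1 = List.replicate t.length 0 := by
  apply List.ext_getElem
  · simp [zArr]
  · intro k hk1 hk2
    have hkn : k < t.length := by simpa [zArr] using hk1
    unfold zArr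
    rw [List.getElem_map, List.getElem_range, List.getElem_replicate,
      if_neg (by omega : ¬(1 ≤ (k : Int) ∧ (k : Int) < 1))]

-- ===== VERDICT (by name: the statement is the Claim_ definition above) =====
theorem manachers_spec : Claim_equal_manachers := by
  intro s _hdom hpre
  unfold Spec_manachers manachers manachers_alt
  dsimp only
  have hg := goodT_of_pre s hpre
  have h3 := hg.1
  rw [← zArr_one (pvTrans s)]
  rw [fold_inv (pvTrans s) hg ((pvTrans s).length - 2) 1 0 0
    (by push_cast; omega) le_rfl (Or.inl ⟨rfl, rfl⟩)]
  rw [PySem.List.pyRange_zero_nat, List.map_map]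
  unfold zArr
  apply List.map_congr_left
  intro j hj
  rw [List.mem_range] at hj
  simp only [Function.comp_apply]
  by_cases hc : 0 < (j : Int) ∧ (j : Int) < ((pvTrans s).length : Int) - 1
  · rw [if_pos ⟨by omega, hc.2⟩, if_pos hc]
    rw [PySem.List.slice_from _ (by omega : (0:Int) ≤ (j:Int) + 1),
      PySem.List.slice_to _ (by omega : (0:Int) ≤ (j:Int))]
    exact (cpl_rad (pvTrans s) hg (j : Int) (by omega) (by omega)).symm
  · rw [if_neg (by omega), if_neg hc]
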